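-- pv_equiv track=rewrite | github.com/br3i/sistere-backend | services/documents/treat_word_list/generate_variations.py | apply_accent
-- ===== SOURCE A (Python) =====
-- accents = {"a": "á", "e": "é", "i": "í", "o": "ó", "u": "ú"}
--
-- def apply_accent(word, word_type):
--     """Applies an accent to the appropriate vowel based on the word type."""
--     word_list = list(word)
--     vowels = [i for i, letter in enumerate(word) if letter in accents]
--
--     if not vowels:
--         return word
--
--     if word_type == "acute" and word[-1] in "aeiouns":
--         index = vowels[-1]
--     elif word_type == "grave" and word[-1] not in "aeiouns":
--         index = vowels[-2] if len(vowels) > 1 else vowels[-1]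
--     elif word_type == "esdrujula":
--         index = (
--             vowels[-3]
--             if len(vowels) > 2
--             else vowels[-2] if len(vowels) > 1 else vowels[0]
--         )
--     else:
--         return word
--
--     word_list[index] = accents[word_list[index]]
--     return "".join(word_list)
-- ===== SOURCE B (Python) =====
-- accents = {"a": "á", "e": "é", "i": "í", "o": "ó", "u": "ú"}
--
-- def apply_accent(word, word_type):
--     """Single right-to-left scan: stop at the k-th vowel from the end (k from the
--     word type), falling back to the earliest vowel when fewer than k exist."""
--     if not word:
--         return word
--     last = word[-1]
--     if word_type == "acute" and last in "aeiouns":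
--         k = 1
--     elif word_type == "grave" and last not in "aeiouns":
--         k = 2
--     elif word_type == "esdrujula":
--         k = 3
--     else:
--         return word
--     target = None
--     for i in range(len(word) - 1, -1, -1):
--         if word[i] in accents:
--             target = i
--             k -= 1
--             if k == 0:
--                 break
--     if target is None:
--         return word
--     return word[:target] + accents[word[target]] + word[target + 1:]
-- ===== Notes on version B (the rewrite author's own statement) =====
-- stated objective: alternative
-- what changed: Instead of building the full list of vowel positions and indexing it from the end, B first maps the word type to a count k (guarding the empty word), then makes one right-to-left scan that stops at the k-th vowel, remembering the latest vowel seen as the fewer-than-k fallback, and rebuilds the word by slicing around the hit.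
import Mathlib
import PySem

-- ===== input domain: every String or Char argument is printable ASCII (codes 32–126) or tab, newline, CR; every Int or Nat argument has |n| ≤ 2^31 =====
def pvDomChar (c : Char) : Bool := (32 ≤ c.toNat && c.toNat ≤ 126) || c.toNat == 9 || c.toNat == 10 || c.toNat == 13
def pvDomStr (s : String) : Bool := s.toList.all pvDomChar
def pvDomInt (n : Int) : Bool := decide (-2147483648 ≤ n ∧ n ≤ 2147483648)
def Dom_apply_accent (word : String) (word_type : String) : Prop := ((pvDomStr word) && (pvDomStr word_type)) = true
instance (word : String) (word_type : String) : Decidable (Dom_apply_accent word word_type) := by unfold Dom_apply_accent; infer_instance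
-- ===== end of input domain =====

-- B replaces A's build-all-vowel-indices-then-index-from-the-end pass by a single
-- right-to-left scan that stops at the k-th vowel, k read off the word type first
-- (objective: alternative decomposition; same cost).

-- shared constant: the module-level dict `accents`
def pvAccents : PySem.Dict Char Char :=
  PySem.Dict.ofList [('a', 'á'), ('e', 'é'), ('i', 'í'), ('o', 'ó'), ('u', 'ú')]
-- ===== PORT A =====
-- the comprehension `[i for i, letter in enumerate(word) if letter in accents]`
def pvVows (r : List (Int × Char)) : List Int :=
  r.filterMap (fun p => if pvAccents.contains p.2 then some p.1 else none)

def apply_accent (word : String) (word_type : String) : String :=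
  if pvVows (PySem.List.enumerate word.toList 0) = [] then word
  else
    match (if word_type = "acute" ∧ (PySem.Str.pyGet? word (-1)).any (fun c => c ∈ "aeiouns".toList) then
        PySem.List.pyGet? (pvVows (PySem.List.enumerate word.toList 0)) (-1)
      else if word_type = "grave" ∧ ¬ (PySem.Str.pyGet? word (-1)).any (fun c => c ∈ "aeiouns".toList) then
        (if (pvVows (PySem.List.enumerate word.toList 0)).length > 1 then
          PySem.List.pyGet? (pvVows (PySem.List.enumerate word.toList 0)) (-2)
        else PySem.List.pyGet? (pvVows (PySem.List.enumerate word.toList 0)) (-1))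
      else if word_type = "esdrujula" then
        (if (pvVows (PySem.List.enumerate word.toList 0)).length > 2 then
          PySem.List.pyGet? (pvVows (PySem.List.enumerate word.toList 0)) (-3)
        else if (pvVows (PySem.List.enumerate word.toList 0)).length > 1 then
          PySem.List.pyGet? (pvVows (PySem.List.enumerate word.toList 0)) (-2)
        else PySem.List.pyGet? (pvVows (PySem.List.enumerate word.toList 0)) 0)
      else none) with
    | none => word
    | some idx =>
        String.ofList (PySem.List.pySetD word.toList idx
          ((pvAccents.get? (PySem.List.pyGetD word.toList idx ' ')).getD (PySem.List.pyGetD word.toList idx ' ')))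

-- ===== PORT B =====
-- the `for i in range(len(word)-1, -1, -1)` loop of Source B: remembers the latest vowel seen
-- (= the earliest in the word), breaking as soon as the count k is exhausted
def pvScanBack : List (Int × Char) → Nat → Option Int
  | [], _ => none
  | (i, c) :: rest, k =>
    if pvAccents.contains c then
      if k ≤ 1 then some i
      else
        match pvScanBack rest (k - 1) with
        | some j => some j
        | none => some i
    else pvScanBack rest k

def apply_accent_alt (word : String) (word_type : String) : String :=
  match word.toList.getLast? with
  | none => word
  | some last =>
    match (if word_type = "acute" ∧ last ∈ "aeiouns".toList then some 1
      else if word_type = "grave" ∧ last ∉ "aeiouns".toList then some 2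
      else if word_type = "esdrujula" then some 3
      else none : Option Nat) with
    | none => word
    | some k =>
      match pvScanBack (PySem.List.enumerate word.toList 0).reverse k with
      | none => word
      | some t =>
        String.ofList (PySem.List.slice word.toList none (some t) ++
          ((pvAccents.get? (PySem.List.pyGetD word.toList t ' ')).getD (PySem.List.pyGetD word.toList t ' '))
          :: PySem.List.slice word.toList (some (t + 1)) none)

-- ===== PRECONDITION & SPEC =====
def Spec_apply_accent (word : String) (word_type : String) (out : String) : Prop := out = apply_accent_alt word word_type
instance (word : String) (word_type : String) (out : String) : Decidable (Spec_apply_accent word word_type out) := by unfold Spec_apply_accent; infer_instance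

-- ===== CLAIM (what is proved, stated in full; the proofs are below) =====
def Claim_equal_apply_accent : Prop := ∀ (word : String) (word_type : String), Dom_apply_accent word word_type → Spec_apply_accent word word_type (apply_accent word word_type)

-- ===== LEMMAS AND PROOFS =====

-- what the backward scan computes, expressed on the vowel-index list of its input
def pvSpecScan (vs : List Int) (k : Nat) : Option Int :=
  if vs = [] then none
  else if k ≤ vs.length then some (vs.getD (k - 1) 0)
  else some (vs.getLast?.getD 0)

theorem pvVows_cons_pos {i : Int} {c : Char} (rest : List (Int × Char)) (hc : pvAccents.contains c) :
    pvVows ((i, c) :: rest) = i :: pvVows rest := by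
  simp [pvVows, hc]

theorem pvScanBack_eq (r : List (Int × Char)) (k : Nat) (hk : 1 ≤ k) :
    pvScanBack r k = pvSpecScan (pvVows r) k := by
  induction r generalizing k with
  | nil => simp [pvScanBack, pvVows, pvSpecScan]
  | cons p rest ih =>
    obtain ⟨i, c⟩ := p
    by_cases hc : pvAccents.contains c
    · rw [pvVows_cons_pos rest hc]
      by_cases h1 : k ≤ 1
      · interval_cases k
        simp [pvScanBack, pvSpecScan, hc]
      · have hih := ih (k - 1) (by omega)
        have hstep : pvScanBack ((i, c) :: rest) k =
            (match pvScanBack rest (k - 1) with | some j => some j | none => some i) := by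
          simp [pvScanBack, hc, h1]
        rw [hstep, hih]
        rcases hv : pvVows rest with _ | ⟨v, vs⟩
        · simp [pvSpecScan, show ¬ k ≤ 1 from h1]
        · have e1 : pvSpecScan (v :: vs) (k - 1) =
              if k - 1 ≤ vs.length + 1 then some ((v :: vs).getD (k - 1 - 1) 0)
              else some ((v :: vs).getLast?.getD 0) := by
            simp [pvSpecScan]
          rw [e1]
          by_cases h2 : k - 1 ≤ vs.length + 1
          · rw [if_pos h2]
            simp only [pvSpecScan, List.length_cons,
              if_neg (List.cons_ne_nil i (v :: vs)), if_pos (show k ≤ vs.length + 1 + 1 by omega)]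
            obtain ⟨m, rfl⟩ : ∃ m, k = m + 2 := ⟨k - 2, by omega⟩
            simp
          · rw [if_neg h2]
            simp only [pvSpecScan, List.length_cons,
              if_neg (List.cons_ne_nil i (v :: vs)),
              if_neg (show ¬ k ≤ vs.length + 1 + 1 by omega), List.getLast?_cons_cons]
    · have hvc : pvVows ((i, c) :: rest) = pvVows rest := by
        simp [pvVows, hc]
      simp [pvScanBack, hc, ih k hk, hvc]

theorem pvGet_neg (vs : List Int) (j : Nat) (h1 : 1 ≤ j) (h2 : j ≤ vs.length) :
    PySem.List.pyGet? vs (-(j : Int)) = some (vs.getD (vs.length - j) 0) := by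
  rw [PySem.List.pyGet?_neg_natCast vs j h1 h2, List.getElem?_eq_getElem (by omega),
    List.getD, List.getElem?_eq_getElem (by omega), Option.getD_some]

theorem pvSpecScan_rev (vs : List Int) (hvs : vs ≠ []) (k : Nat) (hk : 1 ≤ k) :
    pvSpecScan vs.reverse k =
      some (if k ≤ vs.length then vs.getD (vs.length - k) 0 else vs.getD 0 0) := by
  by_cases h : k ≤ vs.length
  · rw [pvSpecScan, if_neg (by simpa using hvs), if_pos (by simp; omega), if_pos h]
    congr 1
    rw [List.getD, List.getElem?_eq_getElem (by simp; omega), List.getD,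
      List.getElem?_eq_getElem (by omega)]
    simp [List.getElem_reverse, show vs.length - 1 - (k - 1) = vs.length - k by omega]
  · rw [pvSpecScan, if_neg (by simpa using hvs), if_neg (by simp; omega), if_neg h]
    rw [List.getLast?_reverse]
    congr 1
    rcases vs with _ | ⟨a, t⟩
    · simp at hvs
    · simp

theorem pvVows_reverse (r : List (Int × Char)) : pvVows r.reverse = (pvVows r).reverse :=
  List.filterMap_reverse ..

theorem pvVows_mem (l : List Char) (x : Int) (hx : x ∈ pvVows (PySem.List.enumerate l 0)) :
    ∃ m : Nat, x = (m : Int) ∧ m < l.length := by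
  simp only [pvVows, List.mem_filterMap] at hx
  obtain ⟨p, hp, hpx⟩ := hx
  rw [PySem.List.mem_enumerate_iff] at hp
  obtain ⟨k, hk, rfl⟩ := hp
  refine ⟨k, ?_, hk⟩
  by_cases h : pvAccents.contains (l[k]) <;> simp [h] at hpx
  omega

theorem pvFinal (l : List Char) (m : Nat) (hm : m < l.length) (v : Char) :
    PySem.List.pySetD l (m : Int) v =
      PySem.List.slice l none (some (m : Int)) ++ v :: PySem.List.slice l (some ((m : Int) + 1)) none := by
  rw [PySem.List.pySetD_natCast, PySem.List.slice_to_natCast,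
    show ((m : Int) + 1) = (((m + 1 : Nat)) : Int) by push_cast; ring,
    PySem.List.slice_from_natCast, List.set_eq_take_cons_drop v hm]

theorem pvStrLast (word : String) (c : Char) (h : word.toList.getLast? = some c) :
    PySem.Str.pyGet? word (-1) = some c := by
  simp [PySem.Str.pyGet?, PySem.List.pyGet?_neg_one, h]

theorem pvGetD_mem (vs : List Int) (j : Nat) (hj : j < vs.length) : vs.getD j 0 ∈ vs := by
  rw [List.getD, List.getElem?_eq_getElem hj, Option.getD_some]
  exact List.getElem_mem hj

theorem pvFinish (word : String) (t : Int)
    (ht : t ∈ pvVows (PySem.List.enumerate word.toList 0)) :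
    String.ofList (PySem.List.pySetD word.toList t
      ((pvAccents.get? (PySem.List.pyGetD word.toList t ' ')).getD (PySem.List.pyGetD word.toList t ' '))) =
    String.ofList (PySem.List.slice word.toList none (some t) ++
      ((pvAccents.get? (PySem.List.pyGetD word.toList t ' ')).getD (PySem.List.pyGetD word.toList t ' '))
      :: PySem.List.slice word.toList (some (t + 1)) none) := by
  obtain ⟨m, rfl, hm⟩ := pvVows_mem word.toList t ht
  rw [pvFinal word.toList m hm]

theorem main_eq (word word_type : String) :
    apply_accent word word_type = apply_accent_alt word word_type := by
  rcases hvs : pvVows (PySem.List.enumerate word.toList 0) with _ | ⟨v0, vtl⟩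
  · simp only [apply_accent, apply_accent_alt, hvs]
    simp only [if_true]
    rcases hl : word.toList.getLast? with _ | ⟨last⟩
    · rfl
    · dsimp only
      have hscan : ∀ k, 1 ≤ k →
          pvScanBack (PySem.List.enumerate word.toList 0).reverse k = none := by
        intro k hk
        rw [pvScanBack_eq _ k hk, pvVows_reverse, hvs]
        simp [pvSpecScan]
      by_cases h1 : word_type = "acute" ∧ last ∈ "aeiouns".toList
      · rw [if_pos h1]
        simp [hscan 1 (by norm_num)]
      · rw [if_neg h1]
        by_cases h2 : word_type = "grave" ∧ last ∉ "aeiouns".toList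
        · rw [if_pos h2]
          simp [hscan 2 (by norm_num)]
        · rw [if_neg h2]
          by_cases h3 : word_type = "esdrujula"
          · rw [if_pos h3]
            simp [hscan 3 (by norm_num)]
          · rw [if_neg h3]
  · have hlne : word.toList ≠ [] := by
      intro h
      rw [h] at hvs
      simp [pvVows, PySem.List.enumerate_nil] at hvs
    simp only [apply_accent, apply_accent_alt]
    rw [hvs, if_neg (List.cons_ne_nil v0 vtl)]
    rcases hl : word.toList.getLast? with _ | ⟨last⟩
    · exact absurd (List.getLast?_eq_none_iff.mp hl) hlne
    · dsimp only
      have hA := pvStrLast word last hl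
      rw [hA]
      simp only [Option.any_some, decide_eq_true_eq]
      by_cases h1 : word_type = "acute" ∧ last ∈ "aeiouns".toList
      · rw [if_pos h1, if_pos h1]
        dsimp only
        rw [pvScanBack_eq _ 1 (by norm_num), pvVows_reverse, hvs,
          pvSpecScan_rev _ (List.cons_ne_nil v0 vtl) 1 (by norm_num),
          if_pos (show 1 ≤ (v0 :: vtl).length by simp),
          show (-1 : Int) = -((1 : Nat) : Int) by norm_num,
          pvGet_neg _ 1 (by norm_num) (by simp)]
        dsimp only
        exact pvFinish word _ (by rw [hvs]; exact pvGetD_mem _ _ (by simp))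
      · rw [if_neg h1, if_neg h1]
        by_cases h2 : word_type = "grave" ∧ last ∉ "aeiouns".toList
        · rw [if_pos h2, if_pos h2]
          dsimp only
          rw [pvScanBack_eq _ 2 (by norm_num), pvVows_reverse, hvs,
            pvSpecScan_rev _ (List.cons_ne_nil v0 vtl) 2 (by norm_num)]
          by_cases hlen2 : 2 ≤ (v0 :: vtl).length
          · rw [if_pos hlen2, if_pos (show (v0 :: vtl).length > 1 by omega),
              show (-2 : Int) = -((2 : Nat) : Int) by norm_num,
              pvGet_neg _ 2 (by norm_num) hlen2]
            dsimp only
            exact pvFinish word _ (by rw [hvs]; exact pvGetD_mem _ _ (by simp))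
          · rw [if_neg hlen2, if_neg (show ¬ (v0 :: vtl).length > 1 by omega),
              show (-1 : Int) = -((1 : Nat) : Int) by norm_num,
              pvGet_neg _ 1 (by norm_num) (by simp),
              show (v0 :: vtl).length - 1 = 0 from by simp at hlen2 ⊢; omega]
            dsimp only
            exact pvFinish word _ (by rw [hvs]; exact pvGetD_mem _ _ (by simp))
        · rw [if_neg h2, if_neg h2]
          by_cases h3 : word_type = "esdrujula"
          · rw [if_pos h3, if_pos h3]
            dsimp only
            rw [pvScanBack_eq _ 3 (by norm_num), pvVows_reverse, hvs,
              pvSpecScan_rev _ (List.cons_ne_nil v0 vtl) 3 (by norm_num)]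
            by_cases hlen3 : 3 ≤ (v0 :: vtl).length
            · rw [if_pos hlen3, if_pos (show (v0 :: vtl).length > 2 by omega),
                show (-3 : Int) = -((3 : Nat) : Int) by norm_num,
                pvGet_neg _ 3 (by norm_num) hlen3]
              dsimp only
              exact pvFinish word _ (by rw [hvs]; exact pvGetD_mem _ _ (by simp))
            · rw [if_neg hlen3, if_neg (show ¬ (v0 :: vtl).length > 2 by omega)]
              by_cases hlen2 : 2 ≤ (v0 :: vtl).length
              · rw [if_pos (show (v0 :: vtl).length > 1 by omega),
                  show (-2 : Int) = -((2 : Nat) : Int) by norm_num,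
                  pvGet_neg _ 2 (by norm_num) hlen2,
                  show (v0 :: vtl).length - 2 = 0 from by simp at hlen3 ⊢; omega]
                dsimp only
                exact pvFinish word _ (by rw [hvs]; exact pvGetD_mem _ _ (by simp))
              · rw [if_neg (show ¬ (v0 :: vtl).length > 1 by omega)]
                rw [show PySem.List.pyGet? (v0 :: vtl) 0 = some ((v0 :: vtl).getD 0 0) from by simp]
                dsimp only
                exact pvFinish word _ (by rw [hvs]; exact pvGetD_mem _ _ (by simp))
          · rw [if_neg h3, if_neg h3]

-- ===== VERDICT (by name: the statement is the Claim_ definition above) =====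
theorem apply_accent_spec : Claim_equal_apply_accent := by
  intro word word_type _
  exact main_eq word word_type
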